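-- pv_equiv track=rewrite | github.com/AlinaKhan01/Pathology_Data_Analyzer | modelVSground/main.py | calculate_metrics
-- ===== SOURCE A (Python) =====
-- from collections import defaultdict
--
-- def calculate_metrics(ai_findings, ground_truth, health_map):
--     tp = defaultdict(int)
--     fp = defaultdict(int)
--     fn = defaultdict(int)
--
--     ai_pathologies = {finding['pathology'] for finding in ai_findings} if ai_findings else set()
--     ground_truth_pathologies = {truth['pathology'] for truth in ground_truth} if ground_truth else set()
--
--     # Flatten health map for reverse lookup
--     reverse_health_map = {}
--     for key, values in health_map.items():
--         for value in values:
--             reverse_health_map[value] = key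
--
--     # Map AI findings and ground truth to their categories
--     mapped_ai_pathologies = {reverse_health_map.get(pathology, pathology) for pathology in ai_pathologies}
--     mapped_ground_truth_pathologies = {reverse_health_map.get(pathology, pathology) for pathology in ground_truth_pathologies}
--
--     # If ground truth is empty, all AI findings are false positives
--     if not mapped_ground_truth_pathologies:
--         for pathology in mapped_ai_pathologies:
--             fp[pathology] += 1
--
--     # If AI findings are empty, all ground truth pathologies are false negatives
--     if not mapped_ai_pathologies:
--         for pathology in mapped_ground_truth_pathologies:
--             fn[pathology] += 1
--
--     # Standard calculation for non-empty AI findings and ground truth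
--     if mapped_ai_pathologies and mapped_ground_truth_pathologies:
--         for pathology in mapped_ai_pathologies:
--             if pathology in mapped_ground_truth_pathologies:
--                 tp[pathology] += 1
--             else:
--                 fp[pathology] += 1
--
--         for pathology in mapped_ground_truth_pathologies:
--             if pathology not in mapped_ai_pathologies:
--                 fn[pathology] += 1
--
--     return tp, fp, fn
-- ===== SOURCE B (Python) =====
-- from collections import defaultdict
--
-- def calculate_metrics(ai_findings, ground_truth, health_map):
--     # One flags dict instead of set algebra: bit 1 = seen in AI, bit 2 = seen in ground truth.
--     cat = {}
--     for key, values in health_map.items():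
--         for value in values:
--             cat[value] = key
--
--     flags = {}
--     for finding in ai_findings:
--         p = finding['pathology']
--         flags[cat.get(p, p)] = 1
--     for truth in ground_truth:
--         p = truth['pathology']
--         c = cat.get(p, p)
--         flags[c] = flags.get(c, 0) | 2
--
--     tp = defaultdict(int)
--     fp = defaultdict(int)
--     fn = defaultdict(int)
--     for c, m in flags.items():
--         if m == 3:
--             tp[c] = 1
--         elif m == 1:
--             fp[c] = 1
--         else:
--             fn[c] = 1
--     return tp, fp, fn
-- ===== Notes on version B (the rewrite author's own statement) =====
-- stated objective: alternative
-- what changed: Replaces A's two set comprehensions plus three empty/non-empty special-case branches with membership loops by a single flags dictionary (bit 1 = seen in AI, bit 2 = seen in ground truth) built in one pass over each raw list, followed by one classification pass over the flags (3->tp, 1->fp, 2->fn); no sets and no cross-membership tests are used.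
import Mathlib
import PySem

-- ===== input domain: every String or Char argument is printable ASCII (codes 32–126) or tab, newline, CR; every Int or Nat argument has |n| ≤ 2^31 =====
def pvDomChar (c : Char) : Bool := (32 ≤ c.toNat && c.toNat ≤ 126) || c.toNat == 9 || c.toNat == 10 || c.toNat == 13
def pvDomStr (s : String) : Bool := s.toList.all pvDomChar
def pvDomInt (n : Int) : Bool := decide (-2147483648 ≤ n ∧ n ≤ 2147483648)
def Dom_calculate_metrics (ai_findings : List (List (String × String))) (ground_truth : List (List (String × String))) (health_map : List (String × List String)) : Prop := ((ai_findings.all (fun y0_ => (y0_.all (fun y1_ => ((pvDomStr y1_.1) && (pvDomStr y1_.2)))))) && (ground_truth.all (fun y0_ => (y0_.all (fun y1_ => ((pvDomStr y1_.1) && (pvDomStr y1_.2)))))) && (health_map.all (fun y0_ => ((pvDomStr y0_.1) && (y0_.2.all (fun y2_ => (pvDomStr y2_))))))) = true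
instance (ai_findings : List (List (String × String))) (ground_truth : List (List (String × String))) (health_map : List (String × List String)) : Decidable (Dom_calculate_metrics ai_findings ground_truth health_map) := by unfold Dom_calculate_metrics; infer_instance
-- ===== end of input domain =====

-- B replaces A's pathology sets and three empty/non-empty special-case branches with one
-- flags dictionary (bit 1 = seen in AI, bit 2 = seen in ground truth) and one classification
-- pass over it — a different decomposition of the same cost.

-- ===== PORT A =====
-- finding['pathology'] (first match in the association list); "" is only reached outside Pre_
def pvPath (f : List (String × String)) : String :=
  (PySem.Dict.mk f).getD "pathology" ""

def calculate_metrics (ai_findings : List (List (String × String))) (ground_truth : List (List (String × String))) (health_map : List (String × List String)) : (List (String × Int)) × (List (String × Int)) × (List (String × Int)) :=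
  let tp : PySem.Dict String Int := PySem.Dict.empty
  let fp : PySem.Dict String Int := PySem.Dict.empty
  let fn : PySem.Dict String Int := PySem.Dict.empty
  let ai_pathologies : PySem.Set String :=
    if ai_findings.isEmpty then PySem.Set.empty
    else PySem.Set.ofList (ai_findings.map (fun finding => pvPath finding))
  let ground_truth_pathologies : PySem.Set String :=
    if ground_truth.isEmpty then PySem.Set.empty
    else PySem.Set.ofList (ground_truth.map (fun truth => pvPath truth))
  let reverse_health_map : PySem.Dict String String :=
    health_map.foldl (fun r kv => kv.2.foldl (fun r v => r.insert v kv.1) r) PySem.Dict.empty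
  let mapped_ai_pathologies : PySem.Set String :=
    PySem.Set.ofList (ai_pathologies.map (fun p => reverse_health_map.getD p p))
  let mapped_ground_truth_pathologies : PySem.Set String :=
    PySem.Set.ofList (ground_truth_pathologies.map (fun p => reverse_health_map.getD p p))
  let fp :=
    if mapped_ground_truth_pathologies.isEmpty then
      mapped_ai_pathologies.foldl (fun d p => d.modify p 0 (· + 1)) fp
    else fp
  let fn :=
    if mapped_ai_pathologies.isEmpty then
      mapped_ground_truth_pathologies.foldl (fun d p => d.modify p 0 (· + 1)) fn
    else fn
  let tpfp :=
    if !mapped_ai_pathologies.isEmpty && !mapped_ground_truth_pathologies.isEmpty then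
      mapped_ai_pathologies.foldl (fun st p =>
        if PySem.Set.contains mapped_ground_truth_pathologies p then (st.1.modify p 0 (· + 1), st.2)
        else (st.1, st.2.modify p 0 (· + 1))) (tp, fp)
    else (tp, fp)
  let fn :=
    if !mapped_ai_pathologies.isEmpty && !mapped_ground_truth_pathologies.isEmpty then
      mapped_ground_truth_pathologies.foldl (fun d p =>
        if PySem.Set.contains mapped_ai_pathologies p then d else d.modify p 0 (· + 1)) fn
    else fn
  (tpfp.1.items, tpfp.2.items, fn.items)

-- ===== PORT B =====
def calculate_metrics_alt (ai_findings : List (List (String × String))) (ground_truth : List (List (String × String))) (health_map : List (String × List String)) : (List (String × Int)) × (List (String × Int)) × (List (String × Int)) :=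
  let cat : PySem.Dict String String :=
    health_map.foldl (fun r kv => kv.2.foldl (fun r v => r.insert v kv.1) r) PySem.Dict.empty
  let flags : PySem.Dict String Int :=
    ai_findings.foldl (fun fl f => fl.insert (cat.getD (pvPath f) (pvPath f)) 1) PySem.Dict.empty
  let flags : PySem.Dict String Int :=
    ground_truth.foldl (fun fl t =>
      let c := cat.getD (pvPath t) (pvPath t)
      fl.insert c (Int.lor (fl.getD c 0) 2)) flags
  let res :=
    flags.items.foldl (fun (st : PySem.Dict String Int × PySem.Dict String Int × PySem.Dict String Int) cm =>
        if cm.2 == 3 then (st.1.insert cm.1 1, st.2.1, st.2.2)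
        else if cm.2 == 1 then (st.1, st.2.1.insert cm.1 1, st.2.2)
        else (st.1, st.2.1, st.2.2.insert cm.1 1))
      (PySem.Dict.empty, PySem.Dict.empty, PySem.Dict.empty)
  (res.1.items, res.2.1.items, res.2.2.items)

-- ===== PRECONDITION & SPEC =====
-- Pre_ excludes exactly the inputs where finding['pathology'] raises KeyError in A (and in B).
def Pre_calculate_metrics (ai_findings : List (List (String × String))) (ground_truth : List (List (String × String))) (health_map : List (String × List String)) : Prop :=
  (∀ f ∈ ai_findings, "pathology" ∈ f.map Prod.fst) ∧ (∀ t ∈ ground_truth, "pathology" ∈ t.map Prod.fst)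
instance (ai_findings : List (List (String × String))) (ground_truth : List (List (String × String))) (health_map : List (String × List String)) : Decidable (Pre_calculate_metrics ai_findings ground_truth health_map) := by unfold Pre_calculate_metrics; infer_instance

def pvWitness_calculate_metrics : (List (List (String × String))) × (List (List (String × String))) × (List (String × List String)) :=
  ([[("pathology", "cyst")], [("pathology", "nodule")]], [[("pathology", "nodule")]], [("lung", ["nodule", "mass"])])

def Spec_calculate_metrics (ai_findings : List (List (String × String))) (ground_truth : List (List (String × String))) (health_map : List (String × List String)) (out : (List (String × Int)) × (List (String × Int)) × (List (String × Int))) : Prop := out = calculate_metrics_alt ai_findings ground_truth health_map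
instance (ai_findings : List (List (String × String))) (ground_truth : List (List (String × String))) (health_map : List (String × List String)) (out : (List (String × Int)) × (List (String × Int)) × (List (String × Int))) : Decidable (Spec_calculate_metrics ai_findings ground_truth health_map out) := by unfold Spec_calculate_metrics; infer_instance

-- ===== CLAIM (what is proved, stated in full; the proofs are below) =====
def Claim_equal_calculate_metrics : Prop := ∀ (ai_findings : List (List (String × String))) (ground_truth : List (List (String × String))) (health_map : List (String × List String)), Dom_calculate_metrics ai_findings ground_truth health_map → Pre_calculate_metrics ai_findings ground_truth health_map → Spec_calculate_metrics ai_findings ground_truth health_map (calculate_metrics ai_findings ground_truth health_map)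

-- ===== LEMMAS AND PROOFS =====

-- deduplicating after mapping equals mapping a deduplicated list and deduplicating again
theorem pv_ofList_map_ofList {α β : Type} [BEq α] [LawfulBEq α] [BEq β] [LawfulBEq β]
    (l : List α) (g : α → β) :
    PySem.Set.ofList ((PySem.Set.ofList l).map g) = PySem.Set.ofList (l.map g) := by
  induction l using List.reverseRecOn with
  | nil => rfl
  | append_singleton xs x ih =>
    rw [PySem.Set.ofList_append_singleton, List.map_append, List.map_singleton,
        PySem.Set.ofList_append_singleton]
    by_cases hx : x ∈ PySem.Set.ofList xs
    · rw [PySem.Set.add_of_mem hx, ih, PySem.Set.add_of_mem]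
      exact (PySem.Set.mem_ofList _ _).2 (List.mem_map_of_mem ((PySem.Set.mem_ofList _ _).1 hx))
    · rw [PySem.Set.add_of_not_mem hx, List.map_append, List.map_singleton,
          PySem.Set.ofList_append_singleton, ih]

-- a counting loop over distinct fresh keys produces the (key, 1) pairs in order
theorem pv_items_foldl_modify (l : List String) (d : PySem.Dict String Int)
    (hnd : l.Nodup) (hf : ∀ p ∈ l, d.contains p = false) :
    (l.foldl (fun d p => d.modify p 0 (· + 1)) d).items
      = d.items ++ l.map (fun p => (p, (1 : Int))) := by
  induction l generalizing d with
  | nil => simp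
  | cons p rest ih =>
    have hp : d.contains p = false := hf p (by simp)
    have hmod : d.modify p 0 (· + 1) = d.insert p 1 := by
      show d.insert p (d.getD p 0 + 1) = _
      rw [PySem.Dict.getD_of_not_contains d 0 hp]
      norm_num
    have hf' : ∀ q ∈ rest, (d.insert p 1).contains q = false := by
      intro q hq
      rw [PySem.Dict.contains_insert]
      have hqp : q ≠ p := fun h => (List.nodup_cons.1 hnd).1 (h ▸ hq)
      simp [hqp, hf q (List.mem_cons_of_mem _ hq)]
    rw [List.foldl_cons, hmod, ih (d.insert p 1) (List.Nodup.of_cons hnd) hf',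
        PySem.Dict.items_insert_of_not_contains d 1 hp]
    simp

-- A's single TP/FP loop splits into two counting loops over the two filtered lists
theorem pv_foldl_pair_split (l T : List String) (d1 d2 : PySem.Dict String Int) :
    l.foldl (fun st p =>
        if PySem.Set.contains T p then (st.1.modify p 0 (· + 1), st.2)
        else (st.1, st.2.modify p 0 (· + 1))) (d1, d2)
      = ((l.filter (fun p => PySem.Set.contains T p)).foldl (fun d p => d.modify p 0 (· + 1)) d1,
         (l.filter (fun p => !PySem.Set.contains T p)).foldl (fun d p => d.modify p 0 (· + 1)) d2) := by
  induction l generalizing d1 d2 with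
  | nil => rfl
  | cons p rest ih =>
    rw [List.foldl_cons]
    by_cases hp : PySem.Set.contains T p = true
    · rw [if_pos hp, ih, List.filter_cons_of_pos hp,
          List.filter_cons_of_neg (by simp only [hp]; decide), List.foldl_cons]
    · have hpf : PySem.Set.contains T p = false := by
        revert hp; cases PySem.Set.contains T p <;> simp
      rw [if_neg hp, ih, List.filter_cons_of_neg hp,
          List.filter_cons_of_pos (by simp only [hpf]; decide), List.foldl_cons]

-- A's FN loop is a counting loop over the filtered list
theorem pv_foldl_skip_filter (l S : List String) (d : PySem.Dict String Int) :
    l.foldl (fun d p =>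
        if PySem.Set.contains S p then d else d.modify p 0 (· + 1)) d
      = (l.filter (fun p => !PySem.Set.contains S p)).foldl (fun d p => d.modify p 0 (· + 1)) d := by
  induction l generalizing d with
  | nil => rfl
  | cons p rest ih =>
    rw [List.foldl_cons]
    by_cases hp : PySem.Set.contains S p = true
    · rw [if_pos hp, ih, List.filter_cons_of_neg (by simp only [hp]; decide)]
    · have hpf : PySem.Set.contains S p = false := by
        revert hp; cases PySem.Set.contains S p <;> simp
      rw [if_neg hp, ih, List.filter_cons_of_pos (by simp only [hpf]; decide), List.foldl_cons]

theorem pv_filter_contains_nil (l : List String) :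
    l.filter (fun x => PySem.Set.contains ([] : List String) x) = [] := by
  simp [PySem.Set.contains]

theorem pv_filter_not_contains_nil (l : List String) :
    l.filter (fun x => !PySem.Set.contains ([] : List String) x) = l := by
  simp [PySem.Set.contains]

-- A's branch structure reduces to the filter/map triple on any two Nodup lists
theorem pv_tails_eq (S T : List String) (hS : S.Nodup) (hT : T.Nodup) :
    (let fp := if T.isEmpty then S.foldl (fun d p => d.modify p 0 (· + 1)) PySem.Dict.empty else PySem.Dict.empty
     let fn := if S.isEmpty then T.foldl (fun d p => d.modify p 0 (· + 1)) PySem.Dict.empty else PySem.Dict.empty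
     let tpfp := if !S.isEmpty && !T.isEmpty then
         S.foldl (fun st p =>
           if PySem.Set.contains T p then (st.1.modify p 0 (· + 1), st.2)
           else (st.1, st.2.modify p 0 (· + 1))) (PySem.Dict.empty, fp)
       else (PySem.Dict.empty, fp)
     let fn := if !S.isEmpty && !T.isEmpty then
         T.foldl (fun d p =>
           if PySem.Set.contains S p then d else d.modify p 0 (· + 1)) fn
       else fn
     (tpfp.1.items, tpfp.2.items, fn.items))
      = ((S.filter (fun p => PySem.Set.contains T p)).map (fun p => (p, (1 : Int))),
         (S.filter (fun p => !PySem.Set.contains T p)).map (fun p => (p, (1 : Int))),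
         (T.filter (fun p => !PySem.Set.contains S p)).map (fun p => (p, (1 : Int)))) := by
  have hfresh : ∀ (l : List String), ∀ p ∈ l, (PySem.Dict.empty : PySem.Dict String Int).contains p = false := by
    intro l p _; rfl
  dsimp only
  rcases Decidable.em (T = []) with hT0 | hT0
  · subst hT0
    rcases Decidable.em (S = []) with hS0 | hS0
    · subst hS0; rfl
    · have hSb : S.isEmpty = false := List.isEmpty_eq_false_iff.2 hS0
      rw [pv_filter_contains_nil, pv_filter_not_contains_nil]
      simp only [hSb, List.isEmpty_nil, Bool.not_true, Bool.not_false, Bool.and_false,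
        Bool.false_eq_true, if_true, if_false, List.filter_nil]
      rw [pv_items_foldl_modify S PySem.Dict.empty hS (hfresh S)]
      simp [show (PySem.Dict.empty : PySem.Dict String Int).items = [] from rfl]
  · rcases Decidable.em (S = []) with hS0 | hS0
    · subst hS0
      have hTb : T.isEmpty = false := List.isEmpty_eq_false_iff.2 hT0
      rw [pv_filter_not_contains_nil]
      simp only [hTb, List.isEmpty_nil, Bool.not_true, Bool.not_false, Bool.false_and,
        Bool.false_eq_true, if_true, if_false, List.filter_nil]
      rw [pv_items_foldl_modify T PySem.Dict.empty hT (hfresh T)]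
      simp [show (PySem.Dict.empty : PySem.Dict String Int).items = [] from rfl]
    · have hSb : S.isEmpty = false := List.isEmpty_eq_false_iff.2 hS0
      have hTb : T.isEmpty = false := List.isEmpty_eq_false_iff.2 hT0
      simp only [hSb, hTb, Bool.not_false, Bool.and_self, Bool.false_eq_true, if_true, if_false]
      rw [pv_foldl_pair_split, pv_foldl_skip_filter]
      dsimp only
      rw [pv_items_foldl_modify _ _ (hS.filter _) (hfresh _),
          pv_items_foldl_modify _ _ (hS.filter _) (hfresh _),
          pv_items_foldl_modify _ _ (hT.filter _) (hfresh _)]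
      simp [show (PySem.Dict.empty : PySem.Dict String Int).items = [] from rfl]

-- the mapped pathology sets computed by A coincide with ofList of the mapped raw list
theorem pv_mapped_eq (l : List (List (String × String))) (R : PySem.Dict String String) :
    PySem.Set.ofList ((if l.isEmpty then PySem.Set.empty
        else PySem.Set.ofList (l.map (fun f => pvPath f))).map (fun p => R.getD p p))
      = PySem.Set.ofList (l.map (fun f => R.getD (pvPath f) (pvPath f))) := by
  rcases Decidable.em (l = []) with hl | hl
  · subst hl; rfl
  · rw [if_neg (by simp [hl]), pv_ofList_map_ofList, List.map_map]
    rfl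

-- ===== B-side lemmas =====

-- B's AI pass: items are the distinct mapped AI categories, each flagged 1
theorem pv_items_flag1 (l : List String) :
    (l.foldl (fun fl c => fl.insert c (1 : Int)) PySem.Dict.empty).items
      = (PySem.Set.ofList l).map (fun c => (c, (1 : Int))) := by
  induction l using List.reverseRecOn with
  | nil => rfl
  | append_singleton xs x ih =>
    rw [List.foldl_append, List.foldl_cons, List.foldl_nil, PySem.Set.ofList_append_singleton]
    by_cases hx : x ∈ PySem.Set.ofList xs
    · have hc : (xs.foldl (fun fl c => fl.insert c (1 : Int)) PySem.Dict.empty).contains x = true := by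
        rw [PySem.Dict.contains_eq_decide_mem_keys, PySem.Dict.keys_foldl_insert,
            PySem.Dict.keys_empty, PySem.Set.update_nil_left]
        simpa using hx
      rw [PySem.Dict.items_insert_of_contains _ _ hc, ih, PySem.Set.add_of_mem hx, List.map_map]
      refine List.map_congr_left ?_
      intro c _
      by_cases hcx : c = x
      · subst hcx; simp
      · simp [hcx, beq_iff_eq]
    · have hc : (xs.foldl (fun fl c => fl.insert c (1 : Int)) PySem.Dict.empty).contains x = false := by
        rw [PySem.Dict.contains_eq_decide_mem_keys, PySem.Dict.keys_foldl_insert,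
            PySem.Dict.keys_empty, PySem.Set.update_nil_left]
        simpa using hx
      rw [PySem.Dict.items_insert_of_not_contains _ _ hc, ih, PySem.Set.add_of_not_mem hx,
          List.map_append, List.map_singleton]

-- B's ground-truth pass: AI entries keep position (value 3 if also in GT, else 1),
-- GT-only categories are appended with value 2, in first-occurrence order
theorem pv_items_flag2 (d0 : PySem.Dict String Int) (S : List String) (hS : S.Nodup)
    (h0 : d0.items = S.map (fun c => (c, (1 : Int)))) (l : List String) :
    (l.foldl (fun fl c => fl.insert c (Int.lor (fl.getD c 0) 2)) d0).items
      = S.map (fun c => (c, if PySem.Set.contains (PySem.Set.ofList l) c then (3 : Int) else 1))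
        ++ ((PySem.Set.ofList l).filter (fun c => !PySem.Set.contains S c)).map (fun c => (c, (2 : Int))) := by
  induction l using List.reverseRecOn with
  | nil =>
    simp [PySem.Set.contains, h0]
  | append_singleton xs x ih =>
    rw [List.foldl_append, List.foldl_cons, List.foldl_nil]
    set dx := xs.foldl (fun fl c => fl.insert c (Int.lor (fl.getD c 0) 2)) d0 with hdx
    have hkeys : dx.keys = S ++ (PySem.Set.ofList xs).filter (fun c => !PySem.Set.contains S c) := by
      have : dx.keys = dx.items.map Prod.fst := rfl
      rw [this, ih, List.map_append, List.map_map, List.map_map]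
      simp [Function.comp_def]
    have hdisj : ∀ c ∈ (PySem.Set.ofList xs).filter (fun c => !PySem.Set.contains S c), c ∉ S := by
      intro c hc
      have h2 := List.of_mem_filter hc
      simpa using h2
    have hknd : dx.keys.Nodup := by
      rw [hkeys]
      exact List.Nodup.append hS ((PySem.Set.nodup_ofList xs).filter _)
        (fun c hcS hcF => hdisj c hcF hcS)
    rw [PySem.Set.ofList_append_singleton]
    by_cases hxS : x ∈ S
    · -- x already an AI key: overwrite with 3
      have hxmem : (x, if PySem.Set.contains (PySem.Set.ofList xs) x then (3 : Int) else 1) ∈ dx.items := by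
        rw [ih]
        exact List.mem_append_left _ (List.mem_map_of_mem hxS)
      have hgetD : dx.getD x 0 = if PySem.Set.contains (PySem.Set.ofList xs) x then (3 : Int) else 1 :=
        PySem.Dict.getD_of_mem_items _ hxmem hknd 0
      have hval : Int.lor (dx.getD x 0) 2 = (3 : Int) := by
        rw [hgetD]
        by_cases h : PySem.Set.contains (PySem.Set.ofList xs) x = true
        · rw [if_pos h]; decide
        · rw [if_neg h]; decide
      have hc : dx.contains x = true := by
        rw [PySem.Dict.contains_eq_decide_mem_keys, hkeys]
        simp [hxS]
      rw [PySem.Dict.items_insert_of_contains _ _ hc, hval, ih, List.map_append, List.map_map,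
          List.map_map]
      congr 1
      · refine List.map_congr_left ?_
        intro c _
        by_cases hcx : c = x
        · subst hcx
          simp only [Function.comp_def]
          rw [if_pos (by simp)]
          rw [if_pos (by simp [PySem.Set.mem_add])]
        · simp only [Function.comp_def]
          rw [if_neg (by simp [hcx])]
          have hcont : PySem.Set.contains (PySem.Set.add (PySem.Set.ofList xs) x) c
              = PySem.Set.contains (PySem.Set.ofList xs) c := by
            simp [PySem.Set.mem_add, hcx]
          rw [hcont]
      · have hfx : (PySem.Set.add (PySem.Set.ofList xs) x).filter (fun c => !PySem.Set.contains S c)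
            = (PySem.Set.ofList xs).filter (fun c => !PySem.Set.contains S c) := by
          by_cases h : x ∈ PySem.Set.ofList xs
          · rw [PySem.Set.add_of_mem h]
          · rw [PySem.Set.add_of_not_mem h, List.filter_append,
                List.filter_cons_of_neg (by simp [hxS]), List.filter_nil, List.append_nil]
        rw [hfx]
        refine (List.map_congr_left ?_).symm
        intro c hc'
        simp only [Function.comp_def]
        rw [if_neg]
        simp only [beq_iff_eq]
        intro hcx
        exact hdisj c hc' (hcx ▸ hxS)
    · by_cases hxG : x ∈ PySem.Set.ofList xs
      · -- x a GT-only key already present with value 2: overwrite keeps (x, 2)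
        have hxF : x ∈ (PySem.Set.ofList xs).filter (fun c => !PySem.Set.contains S c) := by
          refine List.mem_filter.2 ⟨hxG, by simp [hxS]⟩
        have hxmem : (x, (2 : Int)) ∈ dx.items := by
          rw [ih]
          exact List.mem_append_right _ (List.mem_map_of_mem hxF)
        have hgetD : dx.getD x 0 = (2 : Int) := PySem.Dict.getD_of_mem_items _ hxmem hknd 0
        have hval : Int.lor (dx.getD x 0) 2 = (2 : Int) := by rw [hgetD]; decide
        have hc : dx.contains x = true := by
          rw [PySem.Dict.contains_eq_decide_mem_keys, hkeys]
          simp only [decide_eq_true_eq, List.mem_append]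
          exact Or.inr hxF
        rw [PySem.Dict.items_insert_of_contains _ _ hc, hval, ih, PySem.Set.add_of_mem hxG,
            List.map_append]
        congr 1
        · rw [List.map_map]
          refine List.map_congr_left ?_
          intro c hcS
          simp only [Function.comp_def]
          rw [if_neg (by simp only [beq_iff_eq]; intro h; exact hxS (h ▸ hcS))]
        · rw [List.map_map]
          refine List.map_congr_left ?_
          intro c hc'
          simp only [Function.comp_def]
          by_cases hcx : c = x
          · subst hcx; simp
          · rw [if_neg (by simp [hcx])]
      · -- genuinely new key: append (x, 2)
        have hc : dx.contains x = false := by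
          rw [PySem.Dict.contains_eq_decide_mem_keys, hkeys]
          simp only [decide_eq_false_iff_not, List.mem_append]
          rintro (h | h)
          · exact hxS h
          · exact hxG (List.mem_of_mem_filter h)
        have hgetD : dx.getD x 0 = 0 := PySem.Dict.getD_of_not_contains dx 0 hc
        have hval : Int.lor (dx.getD x 0) 2 = (2 : Int) := by rw [hgetD]; decide
        rw [PySem.Dict.items_insert_of_not_contains _ _ hc, hval, ih,
            PySem.Set.add_of_not_mem hxG, List.filter_append,
            List.filter_cons_of_pos (by simp [hxS])]
        simp only [List.filter_nil, List.map_append, List.map_cons, List.map_nil, List.append_assoc]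
        have h1 : S.map (fun c => (c, if PySem.Set.contains (PySem.Set.ofList xs ++ [x]) c then (3 : Int) else 1))
            = S.map (fun c => (c, if PySem.Set.contains (PySem.Set.ofList xs) c then (3 : Int) else 1)) := by
          refine List.map_congr_left ?_
          intro c hcS
          have hne : c ≠ x := fun h => hxS (h ▸ hcS)
          simp [hne]
        rw [h1]

-- B's classification pass splits into three insert loops over the filtered items
theorem pv_classify_split (l : List (String × Int)) (d1 d2 d3 : PySem.Dict String Int) :
    l.foldl (fun st cm =>
        if cm.2 == 3 then (st.1.insert cm.1 1, st.2.1, st.2.2)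
        else if cm.2 == 1 then (st.1, st.2.1.insert cm.1 1, st.2.2)
        else (st.1, st.2.1, st.2.2.insert cm.1 1)) (d1, d2, d3)
      = ((l.filter (fun p => p.2 == 3)).foldl (fun d p => d.insert p.1 (1 : Int)) d1,
         (l.filter (fun p => !(p.2 == 3) && p.2 == 1)).foldl (fun d p => d.insert p.1 (1 : Int)) d2,
         (l.filter (fun p => !(p.2 == 3) && !(p.2 == 1))).foldl (fun d p => d.insert p.1 (1 : Int)) d3) := by
  induction l generalizing d1 d2 d3 with
  | nil => rfl
  | cons p rest ih =>
    rw [List.foldl_cons]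
    by_cases h3 : (p.2 == 3) = true
    · rw [if_pos h3, ih]
      simp [List.foldl_cons, h3]
    · by_cases h1 : (p.2 == 1) = true
      · rw [if_neg (by simp [h3]), if_pos h1, ih]
        simp [List.foldl_cons, h3, h1]
      · rw [if_neg (by simp [h3]), if_neg (by simp [h1]), ih]
        simp [List.foldl_cons, h3, h1]

-- an insert-1 loop over pairs with distinct keys from empty yields the (key, 1) items in order
theorem pv_items_insert_pairs (l : List (String × Int)) (hnd : (l.map Prod.fst).Nodup) :
    (l.foldl (fun d p => d.insert p.1 (1 : Int)) PySem.Dict.empty).items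
      = l.map (fun p => (p.1, (1 : Int))) := by
  have := PySem.Dict.items_foldl_insert_fresh (l := l) (k := Prod.fst) (v := fun _ => (1 : Int))
    (d := PySem.Dict.empty) (by intro a _; rfl) hnd
  simpa using this

-- B's whole pipeline on the mapped category lists yields the same filter/map triple
theorem pv_B_triple (lai lgt : List String) :
    (let flags := lgt.foldl (fun fl c => fl.insert c (Int.lor (fl.getD c 0) 2))
        (lai.foldl (fun fl c => fl.insert c (1 : Int)) PySem.Dict.empty)
     let res := flags.items.foldl (fun (st : PySem.Dict String Int × PySem.Dict String Int × PySem.Dict String Int) cm =>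
         if cm.2 == 3 then (st.1.insert cm.1 1, st.2.1, st.2.2)
         else if cm.2 == 1 then (st.1, st.2.1.insert cm.1 1, st.2.2)
         else (st.1, st.2.1, st.2.2.insert cm.1 1))
       (PySem.Dict.empty, PySem.Dict.empty, PySem.Dict.empty)
     (res.1.items, res.2.1.items, res.2.2.items))
      = (((PySem.Set.ofList lai).filter (fun c => PySem.Set.contains (PySem.Set.ofList lgt) c)).map (fun c => (c, (1 : Int))),
         ((PySem.Set.ofList lai).filter (fun c => !PySem.Set.contains (PySem.Set.ofList lgt) c)).map (fun c => (c, (1 : Int))),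
         ((PySem.Set.ofList lgt).filter (fun c => !PySem.Set.contains (PySem.Set.ofList lai) c)).map (fun c => (c, (1 : Int)))) := by
  dsimp only
  rw [pv_items_flag2 _ (PySem.Set.ofList lai) (PySem.Set.nodup_ofList lai) (pv_items_flag1 lai) lgt,
      pv_classify_split]
  set S := PySem.Set.ofList lai with hSd
  set G := PySem.Set.ofList lgt with hGd
  have hSnd : S.Nodup := PySem.Set.nodup_ofList lai
  have hGnd : G.Nodup := PySem.Set.nodup_ofList lgt
  set f := fun c => (c, if PySem.Set.contains G c then (3 : Int) else 1) with hfd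
  set P2k := G.filter (fun c => !PySem.Set.contains S c) with hP2d
  -- the three filters of the flags items
  have hf3 : (S.map f ++ P2k.map (fun c => (c, (2 : Int)))).filter (fun p => p.2 == 3)
      = (S.filter (fun c => PySem.Set.contains G c)).map f := by
    rw [List.filter_append, List.filter_map, List.filter_map]
    rw [List.filter_congr (p := fun c => ((fun p : String × Int => p.2 == 3) ∘ f) c)
          (q := fun c => PySem.Set.contains G c)
          (by intro c _
              simp only [Function.comp_def, hfd]
              by_cases h : PySem.Set.contains G c = true
              · rw [if_pos h, h]; rfl
              · rw [if_neg h]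
                rcases Bool.eq_false_iff.2 (fun hh => h hh) with _
                cases hcc : PySem.Set.contains G c
                · rfl
                · exact absurd hcc h)]
    rw [show (List.filter ((fun p : String × Int => p.2 == 3) ∘ fun c => (c, (2 : Int))) P2k) = [] from
          List.filter_eq_nil_iff.2 (by intro c _; simp)]
    simp
  have hf1 : (S.map f ++ P2k.map (fun c => (c, (2 : Int)))).filter (fun p => !(p.2 == 3) && p.2 == 1)
      = (S.filter (fun c => !PySem.Set.contains G c)).map f := by
    rw [List.filter_append, List.filter_map, List.filter_map]
    rw [List.filter_congr (p := fun c => ((fun p : String × Int => !(p.2 == 3) && p.2 == 1) ∘ f) c)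
          (q := fun c => !PySem.Set.contains G c)
          (by intro c _
              simp only [Function.comp_def, hfd]
              by_cases h : PySem.Set.contains G c = true
              · rw [if_pos h, h]; rfl
              · rw [if_neg h]
                cases hcc : PySem.Set.contains G c
                · rfl
                · exact absurd hcc h)]
    rw [show (List.filter ((fun p : String × Int => !(p.2 == 3) && p.2 == 1) ∘ fun c => (c, (2 : Int))) P2k) = [] from
          List.filter_eq_nil_iff.2 (by intro c _; simp)]
    simp
  have hfn : (S.map f ++ P2k.map (fun c => (c, (2 : Int)))).filter (fun p => !(p.2 == 3) && !(p.2 == 1))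
      = P2k.map (fun c => (c, (2 : Int))) := by
    rw [List.filter_append, List.filter_map, List.filter_map]
    rw [show (List.filter ((fun p : String × Int => !(p.2 == 3) && !(p.2 == 1)) ∘ f) S) = [] from
          List.filter_eq_nil_iff.2 (by
            intro c _
            simp only [Function.comp_def, hfd]
            by_cases h : PySem.Set.contains G c = true
            · rw [if_pos h]; simp
            · rw [if_neg h]; simp)]
    rw [List.filter_congr (q := fun _ => true) (by intro c _; simp)]
    simp
  rw [hf3, hf1, hfn]
  have hmapnd : ∀ (X : List String), X.Nodup → ((X.map f).map Prod.fst).Nodup := by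
    intro X hX
    rw [List.map_map]
    simpa [hfd, Function.comp_def] using hX
  rw [pv_items_insert_pairs _ (hmapnd _ (hSnd.filter _)),
      pv_items_insert_pairs _ (hmapnd _ (hSnd.filter _)),
      pv_items_insert_pairs (P2k.map (fun c => (c, (2 : Int)))) (by
        rw [List.map_map]
        have h2 : P2k.Nodup := hGnd.filter _
        simpa [Function.comp_def] using h2)]
  simp [hfd, List.map_map, Function.comp_def]

-- ===== VERDICT (by name: the statement is the Claim_ definition above) =====
theorem calculate_metrics_spec : Claim_equal_calculate_metrics := by
  intro ai gt hm _ _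
  show calculate_metrics ai gt hm = calculate_metrics_alt ai gt hm
  simp only [calculate_metrics, calculate_metrics_alt]
  rw [pv_mapped_eq, pv_mapped_eq]
  rw [pv_tails_eq _ _ (PySem.Set.nodup_ofList _) (PySem.Set.nodup_ofList _)]
  set R := hm.foldl (fun r kv => kv.2.foldl (fun r v => r.insert v kv.1) r) PySem.Dict.empty with hR
  rw [← List.foldl_map (f := fun f => R.getD (pvPath f) (pvPath f))
        (g := fun (fl : PySem.Dict String Int) c => fl.insert c (1 : Int)) (l := ai) (init := PySem.Dict.empty),
      ← List.foldl_map (f := fun t => R.getD (pvPath t) (pvPath t))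
        (g := fun (fl : PySem.Dict String Int) c => fl.insert c (Int.lor (fl.getD c 0) 2)) (l := gt)]
  exact (pv_B_triple (ai.map (fun f => R.getD (pvPath f) (pvPath f)))
      (gt.map (fun t => R.getD (pvPath t) (pvPath t)))).symm
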